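-- pv_equiv track=rewrite | github.com/konstantin1472324/Lesson-4- | proc26.py | IsPower5
-- ===== SOURCE A (Python) =====
-- def IsPower5(K):
--     if K == 1:
--         return True
--     power = 5
--     while power <= K:
--         if power == K:
--             return True
--         power *= 5
--     return False
-- ===== SOURCE B (Python) =====
-- def IsPower5(K):
--     if K < 1:
--         return False
--     while K % 5 == 0:
--         K //= 5
--     return K == 1
-- ===== Notes on version B (the rewrite author's own statement) =====
-- stated objective: alternative
-- what changed: B repeatedly divides K by five while divisible and checks that the residue equals one, instead of A's building successive powers upward and comparing each against K.
import Mathlib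
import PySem

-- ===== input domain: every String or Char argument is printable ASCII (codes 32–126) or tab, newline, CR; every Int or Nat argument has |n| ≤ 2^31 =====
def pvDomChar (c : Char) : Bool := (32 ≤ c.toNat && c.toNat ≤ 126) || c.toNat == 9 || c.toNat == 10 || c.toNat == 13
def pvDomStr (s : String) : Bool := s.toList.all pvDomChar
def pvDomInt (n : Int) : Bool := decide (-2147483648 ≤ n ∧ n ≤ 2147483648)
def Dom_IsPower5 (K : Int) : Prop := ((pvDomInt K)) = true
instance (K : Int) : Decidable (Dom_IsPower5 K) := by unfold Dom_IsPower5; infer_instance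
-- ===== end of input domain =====

-- B checks whether K is a power of 5 by dividing out factors of 5 and testing the residue,
-- instead of A's multiplying powers of 5 upward until they reach K (alternative decomposition).


-- ===== PORT A =====
-- while power <= K: if power == K: return True; power *= 5
-- (hp carries the loop invariant 0 < power, needed only for termination)
def IsPower5Loop (K : Int) (power : Int) (hp : 0 < power) : Bool :=
  if _h : power ≤ K then
    if power = K then true
    else IsPower5Loop K (power * 5) (by positivity)
  else false
termination_by (K - power).toNat
decreasing_by rename_i h; omega

def IsPower5 (K : Int) : Bool :=
  if K = 1 then true
  else IsPower5Loop K 5 (by norm_num)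

-- ===== PORT B =====
-- while K % 5 == 0: K //= 5   (hk carries 0 < K, needed only for termination)
def IsPower5AltLoop (K : Int) (hk : 0 < K) : Int :=
  if h : PySem.Int.mod K 5 = 0 then
    IsPower5AltLoop (PySem.Int.floordiv K 5)
      (by
        rw [PySem.Int.floordiv_eq_ediv_of_pos (by norm_num)]
        rw [PySem.Int.mod_eq_zero_iff_dvd] at h
        omega)
  else K
termination_by K.toNat
decreasing_by
  rw [PySem.Int.floordiv_eq_ediv_of_pos (by norm_num)]
  rw [PySem.Int.mod_eq_zero_iff_dvd] at h
  omega

def IsPower5_alt (K : Int) : Bool :=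
  if h : K < 1 then false
  else decide (IsPower5AltLoop K (by omega) = 1)

-- ===== PRECONDITION & SPEC =====
def Spec_IsPower5 (K : Int) (out : Bool) : Prop := out = IsPower5_alt K
instance (K : Int) (out : Bool) : Decidable (Spec_IsPower5 K out) := by unfold Spec_IsPower5; infer_instance

-- ===== CLAIM (what is proved, stated in full; the proofs are below) =====
def Claim_equal_IsPower5 : Prop := ∀ (K : Int), Dom_IsPower5 K → Spec_IsPower5 K (IsPower5 K)

-- ===== LEMMAS AND PROOFS =====

theorem isPower5Loop_iff (K power : Int) (hp : 0 < power) :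
    IsPower5Loop K power hp = true ↔ ∃ n : ℕ, K = power * 5 ^ n := by
  fun_induction IsPower5Loop K power hp with
  | case1 =>
    exact iff_of_true rfl ⟨0, by ring⟩
  | case2 a hp hle hne ih =>
    rw [ih]
    constructor
    · rintro ⟨n, rfl⟩; exact ⟨n + 1, by ring⟩
    · rintro ⟨n, hn⟩
      cases n with
      | zero => exfalso; apply hne; simpa using hn.symm
      | succ m => exact ⟨m, by rw [hn, pow_succ]; ring⟩
  | case3 a hp hle =>
    refine iff_of_false (by simp) ?_
    rintro ⟨n, rfl⟩
    have h5 : (1 : Int) ≤ 5 ^ n := one_le_pow₀ (by norm_num)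
    nlinarith

theorem isPower5AltLoop_iff (K : Int) (hk : 0 < K) :
    IsPower5AltLoop K hk = 1 ↔ ∃ n : ℕ, K = 5 ^ n := by
  fun_induction IsPower5AltLoop K hk with
  | case1 a ha h ih =>
    rw [ih]
    rw [PySem.Int.mod_eq_zero_iff_dvd] at h
    have hd : PySem.Int.floordiv a 5 = a / 5 :=
      PySem.Int.floordiv_eq_ediv_of_pos (by norm_num)
    rw [hd]
    constructor
    · rintro ⟨n, hn⟩
      refine ⟨n + 1, ?_⟩
      rw [pow_succ, ← hn]
      omega
    · rintro ⟨n, rfl⟩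
      cases n with
      | zero => exfalso; omega
      | succ m =>
        refine ⟨m, ?_⟩
        rw [pow_succ]
        omega
  | case2 a ha h =>
    constructor
    · rintro rfl; exact ⟨0, by norm_num⟩
    · rintro ⟨n, rfl⟩
      cases n with
      | zero => norm_num
      | succ m =>
        exfalso; apply h
        rw [PySem.Int.mod_eq_zero_iff_dvd, pow_succ]
        exact Dvd.intro (5 ^ m) (by ring)

-- ===== VERDICT (by name: the statement is the Claim_ definition above) =====
theorem IsPower5_spec : Claim_equal_IsPower5 := by
  intro K _
  unfold Spec_IsPower5 IsPower5 IsPower5_alt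
  split_ifs with h1 h2
  · omega
  · rw [eq_comm, decide_eq_true_iff, isPower5AltLoop_iff]
    exact ⟨0, by omega⟩
  · refine Bool.eq_false_iff.mpr ?_
    rw [ne_eq, isPower5Loop_iff]
    rintro ⟨n, rfl⟩
    have h5 : (1 : Int) ≤ 5 ^ n := one_le_pow₀ (by norm_num)
    nlinarith
  · rw [Bool.eq_iff_iff, isPower5Loop_iff, decide_eq_true_iff, isPower5AltLoop_iff]
    constructor
    · rintro ⟨n, rfl⟩; exact ⟨n + 1, by ring⟩
    · rintro ⟨n, hn⟩
      cases n with
      | zero => exfalso; apply h1; simpa using hn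
      | succ m => exact ⟨m, by rw [hn, pow_succ]; ring⟩
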